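-- pv_equiv track=rewrite | github.com/IsaacG/Advent-of-Code | advent_of_code/2015/d01.py | solve
-- ===== SOURCE A (Python) =====
-- MAPPING = {"(": 1, ")": -1}
--
-- def solve(data: str, part: int) -> int:
--     """Return Santa's final floor and when he gets to the basement."""
--     if part == 1:
--         return sum(MAPPING[i] for i in data)
--
--     floor = 0
--     for count, i in enumerate(data, start=1):
--         floor += MAPPING[i]
--         if floor == -1:
--             return count
--     raise RuntimeError("No solution found.")
-- ===== SOURCE B (Python) =====
-- MAPPING = {"(": 1, ")": -1}
--
--
-- def solve(data: str, part: int) -> int: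
--     """Return Santa's final floor and when he gets to the basement."""
--     if part == 1:
--         return data.count("(") - data.count(")")
--     # The floor only drops at a ')'; after the k-th ')' at index i the floor
--     # is i + 1 - 2k, so the first basement step is the first ')' whose index
--     # equals 2k - 2.  Jump from ')' to ')' with str.find.
--     pos, k = -1, 0
--     while True:
--         pos = data.find(")", pos + 1)
--         if pos == -1:
--             raise RuntimeError("No solution found.")
--         k += 1
--         if pos == 2 * k - 2:
--             return pos + 1
-- ===== Notes on version B (the rewrite author's own statement) =====
-- stated objective: alternative
-- what changed: B answers part 1 by two substring counts (count('(') - count(')')) with no per-char mapping, and part 2 by jumping from ')' to ')' with str.find and testing the closed-form index condition pos == 2k-2 (the floor after the k-th ')' is pos+1-2k), instead of A's running-floor accumulator over every character.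
import Mathlib
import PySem

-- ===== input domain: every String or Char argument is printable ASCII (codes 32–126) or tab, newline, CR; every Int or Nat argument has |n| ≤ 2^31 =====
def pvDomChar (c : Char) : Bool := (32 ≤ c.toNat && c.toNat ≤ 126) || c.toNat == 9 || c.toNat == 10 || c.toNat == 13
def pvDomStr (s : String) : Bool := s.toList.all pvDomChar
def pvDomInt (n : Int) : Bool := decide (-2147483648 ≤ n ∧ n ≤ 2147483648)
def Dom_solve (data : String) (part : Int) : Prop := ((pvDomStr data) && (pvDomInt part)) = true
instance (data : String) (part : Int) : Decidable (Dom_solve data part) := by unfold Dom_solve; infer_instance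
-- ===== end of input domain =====

-- B answers part 1 by two character counts and part 2 by jumping from ')' to ')'
-- and testing the closed-form index condition pos = 2k-2, instead of A's
-- running-floor accumulator over every character.

-- ===== PORT A =====
-- MAPPING[i]; a KeyError on any other char is excluded by Pre_solve (the 0 branch is never reached there)
def pyMapping (c : Char) : Int := if c = '(' then 1 else if c = ')' then -1 else 0

-- the part-2 loop of A; the [] case is A's 'raise RuntimeError' path, excluded by Pre_solve
def solveLoopA : List Char → Int → Int → Int
  | [], _, _ => 0
  | c :: rest, count, floor =>
    let floor' := floor + pyMapping c
    if floor' = -1 then count else solveLoopA rest (count + 1) floor'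

def solve (data : String) (part : Int) : Int :=
  if part = 1 then data.toList.foldl (fun acc c => acc + pyMapping c) 0
  else solveLoopA data.toList 1 0

-- ===== PORT B =====
-- B's find-and-test loop: 'pos = data.find(")", pos+1)' advances char by char to the next ')';
-- flattened here into one scan carrying the absolute index idx and the count k of ')' seen.
-- The [] case is B's 'raise RuntimeError' path (find returned -1), excluded by Pre_solve.
def solveLoopB : List Char → Int → Int → Int
  | [], _, _ => 0
  | c :: rest, idx, k =>
    if c = ')' then
      if idx = 2 * (k + 1) - 2 then idx + 1 else solveLoopB rest (idx + 1) (k + 1)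
    else solveLoopB rest (idx + 1) k

def solve_alt (data : String) (part : Int) : Int :=
  if part = 1 then
    -- data.count("(") - data.count(")"): counting a 1-char substring is exactly List.count
    (data.toList.count '(' : Int) - (data.toList.count ')' : Int)
  else solveLoopB data.toList 0 0

-- ===== PRECONDITION & SPEC =====
-- Pre_ is exactly A's return domain: for part 1 every char must be '(' or ')' (else MAPPING raises
-- KeyError); for part != 1 the running floor must reach -1 over a paren-only prefix (else A raises
-- KeyError at the first other char or RuntimeError at the end; B also raises RuntimeError there).
def Pre_solve (data : String) (part : Int) : Prop :=
  (part = 1 → (data.toList.all fun c => c = '(' || c = ')') = true) ∧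
  (part ≠ 1 → ∃ n ∈ List.range data.toList.length,
    ((data.toList.take (n + 1)).all fun c => c = '(' || c = ')') = true ∧
    ((data.toList.take (n + 1)).map (fun c => if c = '(' then (1 : Int) else -1)).sum = -1)
instance (data : String) (part : Int) : Decidable (Pre_solve data part) := by
  unfold Pre_solve; infer_instance

def pvWitness_solve : String × Int := (")", 2)

def Spec_solve (data : String) (part : Int) (out : Int) : Prop := out = solve_alt data part
instance (data : String) (part : Int) (out : Int) : Decidable (Spec_solve data part out) := by unfold Spec_solve; infer_instance

-- ===== CLAIM (what is proved, stated in full; the proofs are below) =====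
def Claim_equal_solve : Prop := ∀ (data : String) (part : Int), Dom_solve data part → Pre_solve data part → Spec_solve data part (solve data part)

-- ===== LEMMAS AND PROOFS =====

-- part 1: the summed mapping of a paren-only list is its '(' count minus its ')' count
theorem foldl_map_eq_counts (l : List Char) (hl : ∀ c ∈ l, c = '(' ∨ c = ')') : ∀ acc : Int,
    l.foldl (fun acc c => acc + pyMapping c) acc
      = acc + (l.count '(' : Int) - (l.count ')' : Int) := by
  induction l with
  | nil => intro acc; simp
  | cons c rest ih =>
    intro acc
    have hrest : ∀ c ∈ rest, c = '(' ∨ c = ')' := fun x hx => hl x (by simp [hx])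
    rcases hl c (by simp) with h | h <;> subst h <;>
      rw [List.foldl_cons, ih hrest] <;> simp [pyMapping] <;> omega

-- part 2: A's running-floor loop agrees with B's index-condition loop.
-- Invariant: count = idx + 1, floor = idx - 2*k ≥ 0, and some paren-only prefix of the
-- remaining list drives the running floor to -1 (so neither loop reaches a bad char or []).
theorem loopA_eq_loopB : ∀ (l : List Char) (idx k : Int), 0 ≤ idx - 2 * k →
    (∃ n < l.length, (∀ c ∈ l.take (n + 1), c = '(' ∨ c = ')') ∧
      idx - 2 * k + ((l.take (n + 1)).map pyMapping).sum = -1) →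
    solveLoopA l (idx + 1) (idx - 2 * k) = solveLoopB l idx k := by
  intro l
  induction l with
  | nil => intro idx k _ h; obtain ⟨n, hn, _⟩ := h; simp at hn
  | cons c rest ih =>
    intro idx k hnn h
    obtain ⟨n, hn, hpar, hsum⟩ := h
    rw [List.take_succ_cons] at hpar hsum
    have hc : c = '(' ∨ c = ')' := hpar c (by simp)
    simp only [List.map_cons, List.sum_cons] at hsum
    rcases hc with h | h <;> subst h
    · -- '(' : floor rises, B skips the char
      have h1 : idx - 2 * k + pyMapping '(' ≠ -1 := by simp [pyMapping]; omega
      simp only [solveLoopA, solveLoopB, if_neg h1]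
      have he : idx - 2 * k + pyMapping '(' = (idx + 1) - 2 * k := by simp [pyMapping]; ring
      rw [he, show idx + 1 + 1 = (idx + 1) + 1 from rfl]
      simp only [if_neg (by decide : ¬ ('(' = ')'))]
      -- n = 0 is impossible: the one-char prefix sums to 1, not to -(idx-2k)-1
      have hn0 : n ≠ 0 := by
        rintro rfl; simp [pyMapping] at hsum; omega
      refine ih (idx + 1) k (by omega) ⟨n - 1, by simp at hn ⊢; omega, ?_, ?_⟩
      · intro x hx; exact hpar x (by rw [Nat.sub_add_cancel (by omega)] at hx; exact List.mem_cons_of_mem _ hx)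
      · rw [Nat.sub_add_cancel (by omega)]; simp [pyMapping] at hsum ⊢; omega
    · -- ')' : floor drops by one
      by_cases hz : idx = 2 * k
      · have h1 : idx - 2 * k + pyMapping ')' = -1 := by simp [pyMapping]; omega
        simp only [solveLoopA, solveLoopB, if_pos h1,
          if_pos (show idx = 2 * (k + 1) - 2 by omega)]
        simp
      · have h1 : idx - 2 * k + pyMapping ')' ≠ -1 := by simp [pyMapping]; omega
        simp only [solveLoopA, solveLoopB, if_neg h1,
          if_neg (show ¬idx = 2 * (k + 1) - 2 by omega)]
        have he : idx - 2 * k + pyMapping ')' = (idx + 1) - 2 * (k + 1) := by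
          simp [pyMapping]; ring
        rw [he]
        have hn0 : n ≠ 0 := by
          rintro rfl; simp [pyMapping] at hsum; omega
        refine ih (idx + 1) (k + 1) (by omega) ⟨n - 1, by simp at hn ⊢; omega, ?_, ?_⟩
        · intro x hx; exact hpar x (by rw [Nat.sub_add_cancel (by omega)] at hx; exact List.mem_cons_of_mem _ hx)
        · rw [Nat.sub_add_cancel (by omega)]; simp [pyMapping] at hsum ⊢; omega

-- ===== VERDICT (by name: the statement is the Claim_ definition above) =====
theorem solve_spec : Claim_equal_solve := by
  intro data part _ hpre
  unfold Spec_solve solve solve_alt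
  by_cases hp : part = 1
  · have hall : ∀ c ∈ data.toList, c = '(' ∨ c = ')' := by
      intro c hc
      have := List.all_eq_true.mp (hpre.1 hp) c hc
      simpa using this
    rw [if_pos hp, if_pos hp, foldl_map_eq_counts _ hall]; ring
  · rw [if_neg hp, if_neg hp]
    obtain ⟨n, hn, hpar, hsum⟩ := hpre.2 hp
    have hpar' : ∀ c ∈ data.toList.take (n + 1), c = '(' ∨ c = ')' := by
      intro c hc
      have := List.all_eq_true.mp hpar c hc
      simpa using this
    have hmap : (data.toList.take (n + 1)).map (fun c => if c = '(' then (1 : Int) else -1)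
        = (data.toList.take (n + 1)).map pyMapping := by
      refine List.map_congr_left fun x hx => ?_
      rcases hpar' x hx with h | h <;> subst h <;> simp [pyMapping]
    rw [hmap] at hsum
    have := loopA_eq_loopB data.toList 0 0 (by omega)
      ⟨n, by simpa using hn, hpar', by simpa using hsum⟩
    simpa using this
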